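-- pv_equiv track=rewrite | github.com/microsoft/SpeciesClassification | demo/setup_sample_images.py | remove_invalid_str
-- ===== SOURCE A (Python) =====
-- def remove_invalid_str(path):
--     not_allowed_str = [" ", "+", "%"]
--     has_invalid_str = False
--
--     for char in not_allowed_str:
--         if char in path:
--             has_invalid_str = True
--             path = path.replace(char, "_")
--
--     return path, has_invalid_str
-- ===== SOURCE B (Python) =====
-- def remove_invalid_str(path):
--     invalid = {" ", "+", "%"}
--     has_invalid_str = False
--     chars = []
--     for c in path:
--         if c in invalid:
--             chars.append("_")
--             has_invalid_str = True
--         else: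
--             chars.append(c)
--     return "".join(chars), has_invalid_str
-- ===== Notes on version B (the rewrite author's own statement) =====
-- stated objective: simpler
-- what changed: Replaces A's three sequential membership-check-plus-replace scans over the whole string with a single left-to-right character pass that builds the output and the flag together.
import Mathlib
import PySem

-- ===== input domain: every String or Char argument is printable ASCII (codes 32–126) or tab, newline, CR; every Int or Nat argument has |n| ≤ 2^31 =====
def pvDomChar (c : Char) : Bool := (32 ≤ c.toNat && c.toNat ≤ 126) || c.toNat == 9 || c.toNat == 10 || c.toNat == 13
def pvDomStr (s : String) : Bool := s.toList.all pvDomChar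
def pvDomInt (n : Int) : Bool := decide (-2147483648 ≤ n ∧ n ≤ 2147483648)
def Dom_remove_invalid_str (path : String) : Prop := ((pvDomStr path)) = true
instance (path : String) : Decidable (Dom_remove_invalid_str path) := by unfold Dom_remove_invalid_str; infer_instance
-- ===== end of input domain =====

-- B replaces A's three membership-check-plus-replace scans with one character pass
-- that builds the output string and the flag together (objective: simpler).

-- ===== PORT A =====
-- for char in not_allowed_str: if char in path: has_invalid_str = True; path = path.replace(char, "_")
def remove_invalid_str (path : String) : String × Bool :=
  let not_allowed_str := [" ", "+", "%"]
  not_allowed_str.foldl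
    (fun (st : String × Bool) char =>
      if PySem.Str.isIn char st.1 then (PySem.Str.replace st.1 char "_", true) else st)
    (path, false)

-- ===== PORT B =====
-- single pass: for c in path, append '_' (and set the flag) when c is invalid, else append c; join
def remove_invalid_str_alt (path : String) : String × Bool :=
  let invalid := [' ', '+', '%']
  let st := path.toList.foldl
    (fun (st : List Char × Bool) c =>
      if invalid.contains c then (st.1 ++ ['_'], true) else (st.1 ++ [c], st.2))
    ([], false)
  (String.ofList st.1, st.2)

-- ===== PRECONDITION & SPEC =====
def Spec_remove_invalid_str (path : String) (out : String × Bool) : Prop := out = remove_invalid_str_alt path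
instance (path : String) (out : String × Bool) : Decidable (Spec_remove_invalid_str path out) := by unfold Spec_remove_invalid_str; infer_instance

-- ===== CLAIM (what is proved, stated in full; the proofs are below) =====
def Claim_equal_remove_invalid_str : Prop := ∀ (path : String), Dom_remove_invalid_str path → Spec_remove_invalid_str path (remove_invalid_str path)

-- ===== LEMMAS AND PROOFS =====

-- single-character substitution, as a function on characters
def subst1 (c r : Char) (x : Char) : Char := if x = c then r else x

-- B's per-character replacement: '_' for any of the three invalid characters
def gsub (x : Char) : Char := if x = ' ' ∨ x = '+' ∨ x = '%' then '_' else x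

-- one iteration of A's loop
def stepA (st : String × Bool) (char : String) : String × Bool :=
  if PySem.Str.isIn char st.1 then (PySem.Str.replace st.1 char "_", true) else st

theorem replace_go_single (c r : Char) : ∀ (l acc : List Char),
    PySem.Chars.replace.go [c] [r] l.length l acc = acc.reverse ++ l.map (subst1 c r) := by
  intro l
  induction l with
  | nil => intro acc; simp [PySem.Chars.replace.go]
  | cons h t ih =>
    intro acc
    simp only [List.length_cons, PySem.Chars.replace.go, List.isPrefixOf]
    by_cases hc : h = c
    · simp [hc, ih, subst1]
    · simp [hc, Ne.symm hc, ih, subst1]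

theorem replace_single (c r : Char) (l : List Char) :
    PySem.Chars.replace l [c] [r] = l.map (subst1 c r) := by
  simp [PySem.Chars.replace, replace_go_single]

-- Python 'c in s' for a one-character c is list membership
theorem isIn_single (c : Char) (s : String) :
    PySem.Str.isIn (String.ofList [c]) s = s.toList.contains c := by
  have key : PySem.Str.isIn (String.ofList [c]) s = true ↔ s.toList.contains c = true := by
    rw [PySem.Str.isIn_iff_infix]
    simp [List.singleton_infix_iff]
  cases hb : s.toList.contains c
  · cases hiso : PySem.Str.isIn (String.ofList [c]) s
    · rfl
    · have hmem := key.mp hiso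
      simp at hb hmem
      exact absurd hmem hb
  · exact key.mpr hb

-- if c never occurs, substituting it is the identity
theorem map_subst1_of_not_mem (c r : Char) (l : List Char) (h : c ∉ l) :
    l.map (subst1 c r) = l := by
  conv_rhs => rw [← List.map_id l]
  apply List.map_congr_left
  intro x hx
  have hxc : x ≠ c := fun hxc => h (hxc ▸ hx)
  simp [subst1, hxc]

theorem A_eq (path : String) :
    remove_invalid_str path = stepA (stepA (stepA (path, false) " ") "+") "%" := by
  simp only [remove_invalid_str, List.foldl_cons, List.foldl_nil, stepA]

theorem stepA_single (c : Char) (s : List Char) (b : Bool) (_hc : c ≠ '_') :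
    stepA (String.ofList s, b) (String.ofList [c])
      = (String.ofList (s.map (subst1 c '_')), b || s.contains c) := by
  unfold stepA
  rw [isIn_single]
  simp only [String.toList_ofList]
  by_cases h : c ∈ s
  · have hc' : s.contains c = true := by simp [h]
    rw [hc', if_pos rfl, Bool.or_true]
    refine Prod.ext ?_ rfl
    apply String.toList_inj.mp
    rw [PySem.Str.toList_replace]
    simp [replace_single]
  · have hc' : s.contains c = false := by simp [h]
    rw [hc', if_neg (by simp), Bool.or_false,
      map_subst1_of_not_mem c '_' s h]

-- membership of d is unchanged by substituting c ↦ r when d is neither c nor r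
theorem contains_map_subst1 (c r d : Char) (h1 : d ≠ c) (h2 : d ≠ r) (l : List Char) :
    (l.map (subst1 c r)).contains d = l.contains d := by
  induction l with
  | nil => rfl
  | cons h t ih =>
    by_cases hc : h = c
    · have e1 : subst1 c r h = r := by simp [subst1, hc]
      have e2 : (d == r) = false := by simp [h2]
      have hdh : d ≠ h := fun hd => h1 (hd.trans hc)
      have e3 : (d == h) = false := by simp [hdh]
      simp only [List.map_cons, List.contains_cons, ih, e1, e2, e3]
    · have e1 : subst1 c r h = h := by simp [subst1, hc]
      simp only [List.map_cons, List.contains_cons, ih, e1]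

-- the three-substitution composition is B's per-character function
theorem subst_comp (x : Char) :
    subst1 '%' '_' (subst1 '+' '_' (subst1 ' ' '_' x)) = gsub x := by
  by_cases h1 : x = ' '
  · simp [subst1, gsub, h1]
  · by_cases h2 : x = '+'
    · simp [subst1, gsub, h2]
    · by_cases h3 : x = '%'
      · simp [subst1, gsub, h3]
      · simp [subst1, gsub, h1, h2, h3]

theorem any3 (l : List Char) :
    (l.contains ' ' || l.contains '+' || l.contains '%')
      = l.any (fun c => decide (c = ' ') || decide (c = '+') || decide (c = '%')) := by
  induction l with
  | nil => rfl
  | cons h t ih =>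
    simp only [List.contains_cons, List.any_cons, ← ih]
    have a1 : (' ' == h) = decide (h = ' ') := by by_cases hh : h = ' ' <;> simp [hh, Ne.symm]
    have a2 : ('+' == h) = decide (h = '+') := by by_cases hh : h = '+' <;> simp [hh, Ne.symm]
    have a3 : ('%' == h) = decide (h = '%') := by by_cases hh : h = '%' <;> simp [hh, Ne.symm]
    rw [a1, a2, a3]
    simp only [Bool.or_comm, Bool.or_left_comm, Bool.or_assoc]

-- B's fold, characterised
theorem alt_foldl (l : List Char) : ∀ (acc : List Char) (b : Bool),
    l.foldl
      (fun (st : List Char × Bool) c =>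
        if [' ', '+', '%'].contains c then (st.1 ++ ['_'], true) else (st.1 ++ [c], st.2))
      (acc, b)
      = (acc ++ l.map gsub, b || l.any (fun c => c = ' ' || c = '+' || c = '%')) := by
  induction l with
  | nil => simp
  | cons h t ih =>
    intro acc b
    by_cases hh : h = ' ' ∨ h = '+' ∨ h = '%'
    · have hc : [' ', '+', '%'].contains h = true := by
        rcases hh with h1 | h1 | h1 <;> simp [h1]
      have hb : (decide (h = ' ') || decide (h = '+') || decide (h = '%')) = true := by
        rcases hh with h1 | h1 | h1 <;> simp [h1]
      have hg : gsub h = '_' := by rcases hh with h1 | h1 | h1 <;> simp [gsub, h1]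
      simp only [List.foldl_cons, hc, ih, List.map_cons, List.any_cons, hg, hb]
      simp
    · have h1 : h ≠ ' ' := fun e => hh (Or.inl e)
      have h2 : h ≠ '+' := fun e => hh (Or.inr (Or.inl e))
      have h3 : h ≠ '%' := fun e => hh (Or.inr (Or.inr e))
      have hc : [' ', '+', '%'].contains h = false := by simp [h1, h2, h3]
      have hb : (decide (h = ' ') || decide (h = '+') || decide (h = '%')) = false := by
        simp [h1, h2, h3]
      have hg : gsub h = h := by simp [gsub, h1, h2, h3]
      simp only [List.foldl_cons, hc, Bool.false_eq_true, if_false, ih, List.map_cons,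
        List.any_cons, hg, hb]
      simp

theorem alt_eq (path : String) :
    remove_invalid_str_alt path
      = (String.ofList (path.toList.map gsub),
         path.toList.any (fun c => decide (c = ' ') || decide (c = '+') || decide (c = '%'))) := by
  simp only [remove_invalid_str_alt]
  rw [alt_foldl]
  simp

theorem remove_invalid_str_spec' (path : String) :
    remove_invalid_str path = remove_invalid_str_alt path := by
  rw [alt_eq, A_eq,
    show ((path, false) : String × Bool) = (String.ofList path.toList, false) by
      rw [String.ofList_toList],
    show (" " : String) = String.ofList [' '] from rfl,
    show ("+" : String) = String.ofList ['+'] from rfl,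
    show ("%" : String) = String.ofList ['%'] from rfl,
    stepA_single ' ' _ _ (by decide),
    stepA_single '+' _ _ (by decide),
    stepA_single '%' _ _ (by decide),
    contains_map_subst1 ' ' '_' '+' (by decide) (by decide),
    contains_map_subst1 '+' '_' '%' (by decide) (by decide),
    contains_map_subst1 ' ' '_' '%' (by decide) (by decide),
    List.map_map, List.map_map, Bool.false_or, any3]
  have hmap : List.map ((subst1 '%' '_' ∘ subst1 '+' '_') ∘ subst1 ' ' '_') path.toList
      = List.map gsub path.toList :=
    List.map_congr_left (fun x _ => by simpa [Function.comp] using subst_comp x)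
  rw [hmap]

-- ===== VERDICT (by name: the statement is the Claim_ definition above) =====
theorem remove_invalid_str_spec : Claim_equal_remove_invalid_str := by
  intro path _
  unfold Spec_remove_invalid_str
  exact remove_invalid_str_spec' path
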